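-- pv_equiv track=rewrite | github.com/Juhertra/dev | sitemap_builder.py | _paths_match
-- ===== SOURCE A (Python) =====
-- def _paths_match(actual_path: str, spec_path: str) -> bool:
--     """Check if an actual path matches a spec path (including parameterized paths)."""
--     if actual_path == spec_path:
--         return True
--
--     # Handle parameterized paths like /pet/{petId}
--     if '{' in spec_path and '}' in spec_path:
--         # Split both paths into segments
--         actual_segments = actual_path.strip('/').split('/')
--         spec_segments = spec_path.strip('/').split('/')
--
--         # Must have same number of segments
--         if len(actual_segments) != len(spec_segments):
--             return False
--
--         # Check each segment
--         for actual_seg, spec_seg in zip(actual_segments, spec_segments):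
--             # If spec segment is a parameter (starts with { and ends with })
--             if spec_seg.startswith('{') and spec_seg.endswith('}'):
--                 # Any actual segment matches a parameter
--                 continue
--             # Otherwise, segments must match exactly
--             elif actual_seg != spec_seg:
--                 return False
--
--         return True
--
--     return False
-- ===== SOURCE B (Python) =====
-- def _paths_match(actual_path: str, spec_path: str) -> bool:
--     """Check if an actual path matches a spec path (including parameterized paths)."""
--     if actual_path == spec_path:
--         return True
--     if '{' not in spec_path or '}' not in spec_path:
--         return False
--
--     def match(a, s):
--         # recursive simultaneous descent over the two segment lists;
--         # a length mismatch is caught by the base cases, no explicit length check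
--         if not a and not s:
--             return True
--         if not a or not s:
--             return False
--         head_ok = (s[0].startswith('{') and s[0].endswith('}')) or a[0] == s[0]
--         return head_ok and match(a[1:], s[1:])
--
--     return match(actual_path.strip('/').split('/'), spec_path.strip('/').split('/'))
-- ===== Notes on version B (the rewrite author's own statement) =====
-- stated objective: alternative
-- what changed: Replaces A's explicit length check plus zip-loop with early returns by a guard-inverted early-exit and a recursive simultaneous descent over the two segment lists, where length mismatch falls out of the base cases.
import Mathlib
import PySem

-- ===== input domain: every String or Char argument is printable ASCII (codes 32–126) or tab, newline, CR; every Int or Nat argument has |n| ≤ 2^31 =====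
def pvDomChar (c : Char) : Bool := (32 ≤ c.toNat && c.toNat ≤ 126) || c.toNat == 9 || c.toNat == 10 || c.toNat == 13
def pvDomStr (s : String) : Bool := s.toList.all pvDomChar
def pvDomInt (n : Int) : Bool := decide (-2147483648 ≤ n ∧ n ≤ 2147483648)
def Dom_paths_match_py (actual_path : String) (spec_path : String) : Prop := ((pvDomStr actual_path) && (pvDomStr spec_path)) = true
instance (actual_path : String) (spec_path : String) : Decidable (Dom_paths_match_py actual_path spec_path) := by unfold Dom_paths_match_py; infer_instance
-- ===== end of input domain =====

-- B replaces A's explicit length check plus zip-loop with early returns by an inverted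
-- guard and a recursive simultaneous descent over the two segment lists (same cost).

-- ===== PORT A =====
-- s.split('/') with the literal non-empty separator: split? never returns none here, getD is exact
def paths_match_py (actual_path : String) (spec_path : String) : Bool :=
  if actual_path == spec_path then true
  else if PySem.Str.isIn "{" spec_path && PySem.Str.isIn "}" spec_path then
    let actual_segments := (PySem.Str.split? (PySem.Str.stripChars actual_path "/") "/").getD []
    let spec_segments := (PySem.Str.split? (PySem.Str.stripChars spec_path "/") "/").getD []
    if actual_segments.length != spec_segments.length then false
    else
      -- the for-loop over zip(...) with its early 'return False' as a fold on the running verdict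
      (actual_segments.zip spec_segments).foldl
        (fun ok p =>
          if PySem.Str.startswith p.2 "{" && PySem.Str.endswith p.2 "}" then ok
          else if p.1 != p.2 then false
          else ok) true
  else false

-- ===== PORT B =====
-- Source B's inner 'match': recursion on both segment lists at once
def pvMatchSegs : List String → List String → Bool
  | [], [] => true
  | [], _ :: _ => false
  | _ :: _, [] => false
  | a :: as, s :: ss =>
      ((PySem.Str.startswith s "{" && PySem.Str.endswith s "}") || a == s) && pvMatchSegs as ss

def paths_match_py_alt (actual_path : String) (spec_path : String) : Bool :=
  if actual_path == spec_path then true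
  else if !(PySem.Str.isIn "{" spec_path) || !(PySem.Str.isIn "}" spec_path) then false
  else
    pvMatchSegs ((PySem.Str.split? (PySem.Str.stripChars actual_path "/") "/").getD [])
                ((PySem.Str.split? (PySem.Str.stripChars spec_path "/") "/").getD [])

-- ===== PRECONDITION & SPEC =====
def Spec_paths_match_py (actual_path : String) (spec_path : String) (out : Bool) : Prop := out = paths_match_py_alt actual_path spec_path
instance (actual_path : String) (spec_path : String) (out : Bool) : Decidable (Spec_paths_match_py actual_path spec_path out) := by unfold Spec_paths_match_py; infer_instance

-- ===== CLAIM (what is proved, stated in full; the proofs are below) =====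
def Claim_equal_paths_match_py : Prop := ∀ (actual_path : String) (spec_path : String), Dom_paths_match_py actual_path spec_path → Spec_paths_match_py actual_path spec_path (paths_match_py actual_path spec_path)

-- ===== LEMMAS AND PROOFS =====

-- A's loop body is a running conjunction of the per-pair test
theorem pvStep_eq_and (ok : Bool) (p : String × String) :
    (if PySem.Str.startswith p.2 "{" && PySem.Str.endswith p.2 "}" then ok
     else if p.1 != p.2 then false else ok)
    = (ok && ((PySem.Str.startswith p.2 "{" && PySem.Str.endswith p.2 "}") || p.1 == p.2)) := by
  cases h : (PySem.Str.startswith p.2 "{" && PySem.Str.endswith p.2 "}") <;>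
    cases h2 : (p.1 == p.2) <;>
      simp only [bne, h2, Bool.false_eq_true, Bool.not_true, Bool.not_false, if_true, if_false,
        Bool.true_or, Bool.false_or, Bool.and_true, Bool.and_false]

theorem pvFoldl_and_eq (g : String × String → Bool) (l : List (String × String)) (b : Bool) :
    l.foldl (fun ok p => ok && g p) b = (b && l.all g) := by
  induction l generalizing b with
  | nil => simp
  | cons x t ih => simp [List.foldl_cons, ih, Bool.and_assoc]

-- length check + all-pairs test = simultaneous recursion
theorem pvMatchSegs_eq (as ss : List String) :
    (if as.length != ss.length then false
     else (as.zip ss).all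
       (fun p => (PySem.Str.startswith p.2 "{" && PySem.Str.endswith p.2 "}") || p.1 == p.2))
    = pvMatchSegs as ss := by
  induction as generalizing ss with
  | nil => cases ss <;> simp [pvMatchSegs]
  | cons a tas ih =>
    cases ss with
    | nil => simp [pvMatchSegs]
    | cons s tss =>
      by_cases hl : tas.length = tss.length
      · simp [pvMatchSegs, ← ih tss, hl, Bool.and_comm]
      · have : pvMatchSegs tas tss = false := by
          rw [← ih tss]; simp [hl]
        simp [pvMatchSegs, this, hl]

-- A's whole parameterized branch equals B's recursive matcher
theorem pvBody_eq (as ss : List String) :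
    (if as.length != ss.length then false
     else (as.zip ss).foldl
       (fun ok p =>
         if PySem.Str.startswith p.2 "{" && PySem.Str.endswith p.2 "}" then ok
         else if p.1 != p.2 then false else ok) true)
    = pvMatchSegs as ss := by
  rw [show (fun (ok : Bool) (p : String × String) =>
        if PySem.Str.startswith p.2 "{" && PySem.Str.endswith p.2 "}" then ok
        else if p.1 != p.2 then false else ok)
      = (fun ok p => ok &&
          ((PySem.Str.startswith p.2 "{" && PySem.Str.endswith p.2 "}") || p.1 == p.2))
      from funext fun ok => funext fun p => pvStep_eq_and ok p]
  rw [pvFoldl_and_eq, Bool.true_and, pvMatchSegs_eq]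

-- ===== VERDICT (by name: the statement is the Claim_ definition above) =====
theorem paths_match_py_spec : Claim_equal_paths_match_py := by
  intro actual_path spec_path _
  unfold Spec_paths_match_py paths_match_py paths_match_py_alt
  by_cases he : (actual_path == spec_path) = true
  · simp only [he, if_true]
  · simp only [he, Bool.false_eq_true, if_false]
    cases h1 : PySem.Str.isIn "{" spec_path <;> cases h2 : PySem.Str.isIn "}" spec_path <;>
      simp only [Bool.and_true, Bool.and_false, Bool.not_true, Bool.not_false,
        Bool.or_true, Bool.or_false,
        Bool.false_eq_true, if_false, if_true]
    exact pvBody_eq _ _
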